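-- pv_equiv track=rewrite | github.com/jerryczy/csc401_nlp | reddit_political_persuasion/a1_preproc.py | seperatPunc
-- ===== SOURCE A (Python) =====
-- import html, string, re
--
-- def seperatPunc(text):
--     comment = ' '
--     for i in range(len(text)):
--         if text[i] not in string.punctuation:
--             comment += text[:i] + ' '
--             text = text[i:]
--             break
--
--     for i in range(len(text)-1, -1, -1):
--         if text[i] not in string.punctuation:
--             comment += text[:i+1] + ' ' + text[i+1:]
--             break
--     return comment
-- ===== SOURCE B (Python) =====
-- import string
--
-- def seperatPunc(text):
--     idxs = [i for i, c in enumerate(text) if c not in string.punctuation]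
--     if not idxs:
--         return ' '
--     lo, hi = idxs[0], idxs[-1]
--     return ' ' + text[:lo] + ' ' + text[lo:hi + 1] + ' ' + text[hi + 1:]
-- ===== Notes on version B (the rewrite author's own statement) =====
-- stated objective: alternative
-- what changed: A's two directional scan loops with in-loop string rebuilding are replaced by a single pass that collects all non-punctuation indices, then assembles the result with three slices from the first and last index.
import Mathlib
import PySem

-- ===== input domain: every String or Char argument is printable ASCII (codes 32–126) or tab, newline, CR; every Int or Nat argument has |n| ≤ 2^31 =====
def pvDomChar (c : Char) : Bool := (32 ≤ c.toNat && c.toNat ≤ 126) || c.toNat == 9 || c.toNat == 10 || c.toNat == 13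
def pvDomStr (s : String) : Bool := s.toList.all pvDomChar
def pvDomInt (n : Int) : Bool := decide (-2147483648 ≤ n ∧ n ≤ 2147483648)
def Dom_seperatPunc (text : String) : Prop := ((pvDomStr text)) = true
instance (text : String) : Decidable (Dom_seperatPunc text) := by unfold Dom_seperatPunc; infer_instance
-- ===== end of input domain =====

-- B replaces A's two directional break-loops by one index-collection pass plus slicing (alternative decomposition; same asymptotic cost).

-- ===== PORT A =====
-- string.punctuation
def pvPunct : List Char := "!\"#$%&'()*+,-./:;<=>?@[\\]^_`{|}~".toList

-- A's first loop: for i in range(len(text)), break at the first non-punctuation index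
def aFwd : List Char → Nat → Option Nat
  | [], _ => none
  | c :: rest, i => if pvPunct.contains c then aFwd rest (i + 1) else some i

def aBwd (cs : List Char) : Nat → Option Nat
  | 0 => match cs[0]? with
         | some c => if pvPunct.contains c then none else some 0
         | none => none
  | i + 1 => match cs[i + 1]? with
         | some c => if pvPunct.contains c then aBwd cs i else some (i + 1)
         | none => aBwd cs i

def seperatPunc (text : String) : String :=
  let cs0 := text.toList
  let st : List Char × List Char :=
    match aFwd cs0 0 with
    | some i => ((' ' :: cs0.take i) ++ [' '], cs0.drop i)
    | none => ([' '], cs0)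
  match aBwd st.2 (st.2.length - 1) with
  | some i => String.ofList (st.1 ++ st.2.take (i + 1) ++ [' '] ++ st.2.drop (i + 1))
  | none => String.ofList st.1

-- ===== PORT B =====
def seperatPunc_alt (text : String) : String :=
  let cs := text.toList
  let idxs := ((PySem.List.enumerate cs).filter (fun q => !pvPunct.contains q.2)).map (·.1)
  match idxs.head?, idxs.getLast? with
  | some lo, some hi =>
      String.ofList ([' '] ++ PySem.List.slice cs none (some lo) ++ [' ']
        ++ PySem.List.slice cs (some lo) (some (hi + 1)) ++ [' ']
        ++ PySem.List.slice cs (some (hi + 1)) none)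
  | _, _ => " "

-- ===== PRECONDITION & SPEC =====
def Spec_seperatPunc (text : String) (out : String) : Prop := out = seperatPunc_alt text
instance (text : String) (out : String) : Decidable (Spec_seperatPunc text out) := by unfold Spec_seperatPunc; infer_instance

-- ===== CLAIM (what is proved, stated in full; the proofs are below) =====
def Claim_equal_seperatPunc : Prop := ∀ (text : String), Dom_seperatPunc text → Spec_seperatPunc text (seperatPunc text)

-- ===== LEMMAS AND PROOFS =====

-- proof-side characterisation: the list of non-punctuation indices of cs
def nidxs : List Char → List Nat
  | [] => []
  | c :: rest =>
      if pvPunct.contains c then (nidxs rest).map (· + 1)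
      else 0 :: (nidxs rest).map (· + 1)

lemma enum_filter (cs : List Char) (s : Int) :
    ((PySem.List.enumerate cs s).filter (fun q => !pvPunct.contains q.2)).map (·.1)
      = (nidxs cs).map (fun n : Nat => s + (n : Int)) := by
  induction cs generalizing s with
  | nil => simp [PySem.List.enumerate_nil, nidxs]
  | cons c rest ih =>
      rw [PySem.List.enumerate_cons, List.filter_cons]
      by_cases h : c ∈ pvPunct
      · rw [if_neg (by simp [h]), ih (s + 1)]
        rw [show nidxs (c :: rest) = (nidxs rest).map (· + 1) from by simp [nidxs, h]]
        rw [List.map_map]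
        exact List.map_congr_left (fun n _ => by simp only [Function.comp_apply]; push_cast; ring)
      · rw [if_pos (by simp [h]), List.map_cons, ih (s + 1)]
        rw [show nidxs (c :: rest) = 0 :: (nidxs rest).map (· + 1) from by simp [nidxs, h]]
        rw [List.map_cons, List.map_map]
        refine congrArg₂ _ (by simp) ?_
        exact List.map_congr_left (fun n _ => by simp only [Function.comp_apply]; push_cast; ring)

lemma aFwd_eq (cs : List Char) (k : Nat) :
    aFwd cs k = (nidxs cs).head?.map (· + k) := by
  induction cs generalizing k with
  | nil => simp [aFwd, nidxs]
  | cons c rest ih =>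
      by_cases h : c ∈ pvPunct
      · rw [show aFwd (c :: rest) k = aFwd rest (k + 1) from by simp [aFwd, h]]
        rw [show nidxs (c :: rest) = (nidxs rest).map (· + 1) from by simp [nidxs, h]]
        rw [ih (k + 1), List.head?_map]
        cases (nidxs rest).head? with
        | none => rfl
        | some a => simp; omega
      · rw [show aFwd (c :: rest) k = some k from by simp [aFwd, h]]
        rw [show nidxs (c :: rest) = 0 :: (nidxs rest).map (· + 1) from by simp [nidxs, h]]
        simp

lemma aBwd_append_lt (cs : List Char) (c : Char) (i : Nat) (h : i < cs.length) :
    aBwd (cs ++ [c]) i = aBwd cs i := by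
  induction i with
  | zero =>
      simp only [aBwd, List.getElem?_append_left h]
  | succ j ih =>
      have hj : j < cs.length := Nat.lt_of_succ_lt h
      simp only [aBwd, List.getElem?_append_left h]
      cases hc : cs[j + 1]? with
      | none => simp [ih hj]
      | some d => simp [ih hj]

lemma nidxs_append (cs : List Char) (c : Char) :
    nidxs (cs ++ [c]) = nidxs cs ++ (if pvPunct.contains c then [] else [cs.length]) := by
  induction cs with
  | nil => by_cases h : c ∈ pvPunct <;> simp [nidxs, h]
  | cons d rest ih =>
      by_cases hd : d ∈ pvPunct <;> by_cases hc : c ∈ pvPunct <;>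
        simp [nidxs, hd, hc, ih]

lemma aBwd_eq (cs : List Char) :
    aBwd cs (cs.length - 1) = (nidxs cs).getLast? := by
  induction cs using List.reverseRecOn with
  | nil => simp [aBwd, nidxs]
  | append_singleton cs c ih =>
      rw [nidxs_append]
      by_cases hc : c ∈ pvPunct
      · cases cs with
        | nil => simp [aBwd, nidxs, hc]
        | cons d rest =>
            have hlen : ((d :: rest) ++ [c]).length - 1 = rest.length + 1 := by simp
            rw [hlen]
            have hg : ((d :: rest) ++ [c])[rest.length + 1]? = some c := by
              rw [List.getElem?_append_right (by simp)]
              simp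
            rw [show aBwd ((d :: rest) ++ [c]) (rest.length + 1)
                  = aBwd ((d :: rest) ++ [c]) rest.length from by
              simp only [aBwd, hg]; simp [hc]]
            rw [aBwd_append_lt (d :: rest) c rest.length (by simp)]
            rw [show rest.length = (d :: rest).length - 1 from by simp, ih]
            simp [hc]
      · cases cs with
        | nil => simp [aBwd, nidxs, hc]
        | cons d rest =>
            have hlen : ((d :: rest) ++ [c]).length - 1 = rest.length + 1 := by simp
            rw [hlen]
            have hg : ((d :: rest) ++ [c])[rest.length + 1]? = some c := by
              rw [List.getElem?_append_right (by simp)]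
              simp
            rw [show aBwd ((d :: rest) ++ [c]) (rest.length + 1)
                  = some (rest.length + 1) from by
              simp only [aBwd, hg]; simp [hc]]
            simp [hc]

lemma nidxs_pairwise (cs : List Char) : (nidxs cs).Pairwise (· < ·) := by
  induction cs with
  | nil => simp [nidxs]
  | cons c rest ih =>
      by_cases h : c ∈ pvPunct
      · rw [show nidxs (c :: rest) = (nidxs rest).map (· + 1) from by simp [nidxs, h]]
        exact (List.pairwise_map.2 (ih.imp (by omega)))
      · rw [show nidxs (c :: rest) = 0 :: (nidxs rest).map (· + 1) from by simp [nidxs, h]]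
        refine List.pairwise_cons.2 ⟨?_, List.pairwise_map.2 (ih.imp (by omega))⟩
        intro n hn
        rcases List.mem_map.1 hn with ⟨m, _, rfl⟩
        omega

lemma nidxs_drop (cs : List Char) (k : Nat) :
    nidxs (cs.drop k) = ((nidxs cs).filter (fun n => decide (k ≤ n))).map (· - k) := by
  induction cs generalizing k with
  | nil => simp [nidxs]
  | cons c rest ih =>
      cases k with
      | zero =>
          simp only [List.drop_zero]
          have : ∀ l : List Nat, (l.filter (fun n => decide (0 ≤ n))).map (· - 0) = l := by
            intro l; simp
          rw [this]
      | succ j =>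
          rw [List.drop_succ_cons, ih j]
          have h1 : ((fun n => decide (j + 1 ≤ n)) ∘ (fun n : Nat => n + 1))
              = (fun n : Nat => decide (j ≤ n)) := by funext n; simp
          have h2 : ((fun n : Nat => n - (j + 1)) ∘ (fun n : Nat => n + 1))
              = (fun n : Nat => n - j) := by funext n; simp only [Function.comp_apply]; omega
          by_cases h : c ∈ pvPunct
          · rw [show nidxs (c :: rest) = (nidxs rest).map (· + 1) from by simp [nidxs, h]]
            rw [List.filter_map, List.map_map, h1, h2]
          · rw [show nidxs (c :: rest) = 0 :: (nidxs rest).map (· + 1) from by simp [nidxs, h]]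
            rw [List.filter_cons_of_neg (by simp), List.filter_map, List.map_map, h1, h2]

lemma head_le_of_mem {l : List Nat} (hp : l.Pairwise (· < ·)) {lo : Nat}
    (hl : l.head? = some lo) : ∀ n ∈ l, lo ≤ n := by
  cases l with
  | nil => simp at hl
  | cons a t =>
      simp at hl
      subst hl
      intro n hn
      rcases List.mem_cons.1 hn with rfl | hn
      · omega
      · have := (List.pairwise_cons.1 hp).1 n hn
        omega

-- ===== VERDICT (by name: the statement is the Claim_ definition above) =====
theorem seperatPunc_spec : Claim_equal_seperatPunc := by
  intro text _
  show seperatPunc text = seperatPunc_alt text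

  simp only [seperatPunc, seperatPunc_alt]
  rw [enum_filter]
  set cs0 := text.toList with hcs0
  cases hn : (nidxs cs0).head? with
  | none =>
      have hnil : nidxs cs0 = [] := by
        cases h : nidxs cs0 with
        | nil => rfl
        | cons a t => rw [h] at hn; simp at hn
      rw [hnil]
      rw [show aFwd cs0 0 = none from by rw [aFwd_eq, hnil]; rfl]
      simp only []
      rw [aBwd_eq, hnil]
      rfl
  | some lo =>
      have hne : nidxs cs0 ≠ [] := by
        intro h; rw [h] at hn; simp at hn
      obtain ⟨hi, hhi⟩ : ∃ hi, (nidxs cs0).getLast? = some hi := by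
        cases h : (nidxs cs0).getLast? with
        | some x => exact ⟨x, rfl⟩
        | none => exact absurd (List.getLast?_eq_none_iff.1 h) hne
      have hmemhi : hi ∈ nidxs cs0 := by
        rcases List.getLast?_eq_some_iff.1 hhi with ⟨t, ht⟩
        rw [ht]; exact List.mem_concat_self
      have hlohi : lo ≤ hi :=
        head_le_of_mem (nidxs_pairwise cs0) hn hi hmemhi
      have hfilter : (nidxs cs0).filter (fun n => decide (lo ≤ n)) = nidxs cs0 :=
        List.filter_eq_self.2 (fun n hmem => by
          simpa using head_le_of_mem (nidxs_pairwise cs0) hn n hmem)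
      have hbwd : aBwd (cs0.drop lo) ((cs0.drop lo).length - 1) = some (hi - lo) := by
        rw [aBwd_eq, nidxs_drop, hfilter, List.getLast?_map, hhi]
        rfl
      rw [show aFwd cs0 0 = some lo from by rw [aFwd_eq, hn]; rfl]
      simp only []
      rw [hbwd, List.head?_map, List.getLast?_map, hn, hhi]
      simp only [Option.map_some]
      simp only [zero_add]
      rw [PySem.List.slice_to_natCast]
      rw [show ((hi : Int) + 1) = ((hi + 1 : Nat) : Int) from by push_cast; ring]
      rw [PySem.List.slice_natCast, PySem.List.slice_from_natCast]
      congr 1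
      rw [List.drop_drop]
      rw [show hi + 1 - lo = hi - lo + 1 from by omega,
          show lo + (hi - lo + 1) = hi + 1 from by omega]
      simp
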